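-- pv_equiv track=rewrite | github.com/kitastic/reportGraphs | reports2020/reporting.py | definePayTier
-- ===== SOURCE A (Python) =====
-- def definePayTier(employees):
--     '''
--     Hardcode each employees' paygrade by name. This function needs
--     to be updated each time there is a new employee.
--
--     Args:
--         employees (dict): list of employees
--
--     Returns:
--         payGrade (dict): each employee is assigned a pay tier and rent amount
--     '''
--     payGrade = dict()
--     # 850/wk
--     tier1 = ["Vu", "Nick", "Cindy", "Tu", "Thi"]
--     # 900/wk
--     tier2 = ["Hong","Lyna", "Rose", "Bin","Tai"]
--     # 1000/wk
--     tier3 = ["De","Quang","Van","Vivian","Kelly","Anna","Andrew","Linh", "Tung", "Tianna", "Joey", "Kim", "Tam", "Tien","Ngoc"]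
--     # 1100/wk
--     tier4 = ["Cici"]
--     # weekly rent deductions
--     rent60 = ["Hong", "Rose", "De", "Cindy", "Tam", "Joey", "Ngoc", "Tai"]
--     rent70 = ["Vu", "Quang", "Tung", "Nick", "Tianna", "Kim"]
--     rent35 = ["Van", "Vivian"]
--
--     for person in employees:
--         if person in tier1:
--             if person in rent60:
--                 payGrade[person] = [850,60]
--             elif person in rent70:
--                 payGrade[person] = [850,70]
--             elif person in rent35:
--                 payGrade[person] = [850,35]
--             else:
--                 payGrade[person] = [850,0]
--         elif person in tier2:
--             if person in rent60:
--                 payGrade[person] = [900,60]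
--             elif person in rent70:
--                 payGrade[person] = [900,70]
--             elif person in rent35:
--                 payGrade[person] = [900,35]
--             else:
--                 payGrade[person] = [900,0]
--         elif person in tier3:
--             if person in rent60:
--                 payGrade[person] = [1000,60]
--             elif person in rent70:
--                 payGrade[person] = [1000,70]
--             elif person in rent35:
--                 payGrade[person] = [1000,35]
--             else:
--                 payGrade[person] = [1000,0]
--         elif person in tier4:
--             if person in rent60:
--                 payGrade[person] = [1100,60]
--             elif person in rent70:
--                 payGrade[person] = [1100,70]
--             elif person in rent35:
--                 payGrade[person] = [1100,35]
--             else: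
--                 payGrade[person] = [1100,0]
--         else:
--             payGrade[person] = [0,0]
--
--     return payGrade
-- ===== SOURCE B (Python) =====
-- def definePayTier(employees):
--     # Simpler: two lookup tables built once replace the nested if/elif cascade.
--     tier1 = ["Vu", "Nick", "Cindy", "Tu", "Thi"]
--     tier2 = ["Hong","Lyna", "Rose", "Bin","Tai"]
--     tier3 = ["De","Quang","Van","Vivian","Kelly","Anna","Andrew","Linh", "Tung", "Tianna", "Joey", "Kim", "Tam", "Tien","Ngoc"]
--     tier4 = ["Cici"]
--     rent60 = ["Hong", "Rose", "De", "Cindy", "Tam", "Joey", "Ngoc", "Tai"]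
--     rent70 = ["Vu", "Quang", "Tung", "Nick", "Tianna", "Kim"]
--     rent35 = ["Van", "Vivian"]
--     pay = dict([(n, 850) for n in tier1] + [(n, 900) for n in tier2]
--                + [(n, 1000) for n in tier3] + [(n, 1100) for n in tier4])
--     rent = dict([(n, 60) for n in rent60] + [(n, 70) for n in rent70]
--                 + [(n, 35) for n in rent35])
--     return {p: [pay.get(p, 0), rent.get(p, 0)] for p in employees}
-- ===== Notes on version B (the rewrite author's own statement) =====
-- stated objective: simpler
-- what changed: Replaces the 4x4 nested if/elif membership cascade with two name->amount lookup tables built once and a single dict comprehension over the employees; safe because every rent-list name belongs to some tier and no name is in two tiers.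
import Mathlib
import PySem

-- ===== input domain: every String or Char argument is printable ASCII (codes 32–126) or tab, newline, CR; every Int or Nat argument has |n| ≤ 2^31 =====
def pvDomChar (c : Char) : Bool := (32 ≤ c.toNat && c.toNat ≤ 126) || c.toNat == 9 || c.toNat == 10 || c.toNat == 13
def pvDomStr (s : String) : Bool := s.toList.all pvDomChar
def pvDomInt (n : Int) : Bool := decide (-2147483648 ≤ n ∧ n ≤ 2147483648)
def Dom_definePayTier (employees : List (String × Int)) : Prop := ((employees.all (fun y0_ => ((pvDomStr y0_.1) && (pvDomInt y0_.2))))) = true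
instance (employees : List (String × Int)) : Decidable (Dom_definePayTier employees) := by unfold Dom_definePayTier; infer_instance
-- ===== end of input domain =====

-- B is a simpler table-driven rewrite of A (two lookup dicts instead of the nested if/elif cascade);
-- the Python returns a dict, ported as an insertion-ordered association list (PySem.Dict items).

-- the hardcoded name lists (identical literals in both Pythons)
def pvTier1 : List String := ["Vu", "Nick", "Cindy", "Tu", "Thi"]
def pvTier2 : List String := ["Hong", "Lyna", "Rose", "Bin", "Tai"]
def pvTier3 : List String := ["De", "Quang", "Van", "Vivian", "Kelly", "Anna", "Andrew", "Linh", "Tung", "Tianna", "Joey", "Kim", "Tam", "Tien", "Ngoc"]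
def pvTier4 : List String := ["Cici"]
def pvRent60 : List String := ["Hong", "Rose", "De", "Cindy", "Tam", "Joey", "Ngoc", "Tai"]
def pvRent70 : List String := ["Vu", "Quang", "Tung", "Nick", "Tianna", "Kim"]
def pvRent35 : List String := ["Van", "Vivian"]

-- ===== PORT A =====
-- A's loop body: nested if/elif cascade over the hardcoded lists (Python `in` on a list = List.contains)
def pvBodyA (person : String) : List Int :=
  if pvTier1.contains person then
    if pvRent60.contains person then [850, 60]
    else if pvRent70.contains person then [850, 70]
    else if pvRent35.contains person then [850, 35]
    else [850, 0]
  else if pvTier2.contains person then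
    if pvRent60.contains person then [900, 60]
    else if pvRent70.contains person then [900, 70]
    else if pvRent35.contains person then [900, 35]
    else [900, 0]
  else if pvTier3.contains person then
    if pvRent60.contains person then [1000, 60]
    else if pvRent70.contains person then [1000, 70]
    else if pvRent35.contains person then [1000, 35]
    else [1000, 0]
  else if pvTier4.contains person then
    if pvRent60.contains person then [1100, 60]
    else if pvRent70.contains person then [1100, 70]
    else if pvRent35.contains person then [1100, 35]
    else [1100, 0]
  else [0, 0]

def definePayTier (employees : List (String × Int)) : List (String × List Int) :=
  (employees.foldl (fun (d : PySem.Dict String (List Int)) p => d.insert p.1 (pvBodyA p.1))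
    PySem.Dict.empty).items

-- ===== PORT B =====
def pvPayTable : PySem.Dict String Int :=
  PySem.Dict.ofList (pvTier1.map (fun n => (n, 850)) ++ pvTier2.map (fun n => (n, 900))
    ++ pvTier3.map (fun n => (n, 1000)) ++ pvTier4.map (fun n => (n, 1100)))

def pvRentTable : PySem.Dict String Int :=
  PySem.Dict.ofList (pvRent60.map (fun n => (n, 60)) ++ pvRent70.map (fun n => (n, 70))
    ++ pvRent35.map (fun n => (n, 35)))

def definePayTier_alt (employees : List (String × Int)) : List (String × List Int) :=
  (employees.foldl
    (fun (d : PySem.Dict String (List Int)) p =>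
      d.insert p.1 [pvPayTable.getD p.1 0, pvRentTable.getD p.1 0])
    PySem.Dict.empty).items

-- ===== PRECONDITION & SPEC =====
def Spec_definePayTier (employees : List (String × Int)) (out : List (String × List Int)) : Prop := out = definePayTier_alt employees
instance (employees : List (String × Int)) (out : List (String × List Int)) : Decidable (Spec_definePayTier employees out) := by unfold Spec_definePayTier; infer_instance

-- ===== CLAIM (what is proved, stated in full; the proofs are below) =====
def Claim_equal_definePayTier : Prop := ∀ (employees : List (String × Int)), Dom_definePayTier employees → Spec_definePayTier employees (definePayTier employees)

-- ===== LEMMAS AND PROOFS =====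

-- all names occurring in any hardcoded list (proof helper)
def pvAllNames : List String :=
  ["Vu", "Nick", "Cindy", "Tu", "Thi", "Hong", "Lyna", "Rose", "Bin", "Tai",
   "De", "Quang", "Van", "Vivian", "Kelly", "Anna", "Andrew", "Linh", "Tung",
   "Tianna", "Joey", "Kim", "Tam", "Tien", "Ngoc", "Cici"]

lemma pvBody_eq (s : String) :
    pvBodyA s = [pvPayTable.getD s 0, pvRentTable.getD s 0] := by
  by_cases h : s ∈ pvAllNames
  · fin_cases h <;> decide
  · have hc : ∀ (l : List String), (∀ x ∈ l, x ∈ pvAllNames) → l.contains s = false := by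
      intro l hl
      simpa using fun hm => h (hl s hm)
    have key : ∀ (l : List (String × Int)), (∀ p ∈ l, p.1 ∈ pvAllNames) →
        l.find? (fun p => p.1 == s) = none := by
      intro l hl
      apply List.find?_eq_none.mpr
      intro p hp
      simp only [beq_iff_eq]
      intro e
      exact h (e ▸ hl p hp)
    have hp : pvPayTable.getD s 0 = 0 := by
      simp only [PySem.Dict.getD, PySem.Dict.get?]
      rw [key _ (by decide)]
      rfl
    have hr : pvRentTable.getD s 0 = 0 := by
      simp only [PySem.Dict.getD, PySem.Dict.get?]
      rw [key _ (by decide)]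
      rfl
    have m1 : s ∉ pvTier1 := fun hm => h (by fin_cases hm <;> decide)
    have m2 : s ∉ pvTier2 := fun hm => h (by fin_cases hm <;> decide)
    have m3 : s ∉ pvTier3 := fun hm => h (by fin_cases hm <;> decide)
    have m4 : s ∉ pvTier4 := fun hm => h (by fin_cases hm; decide)
    simp [pvBodyA, hp, hr, m1, m2, m3, m4]

-- ===== VERDICT (by name: the statement is the Claim_ definition above) =====
theorem definePayTier_spec : Claim_equal_definePayTier := by
  intro employees _
  unfold Spec_definePayTier definePayTier definePayTier_alt
  simp only [pvBody_eq]
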